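-- pv_equiv track=rewrite | github.com/udilerner99/My_Notes | csv_work/python_sample/sample_3.py | monthly_active_users
-- ===== SOURCE A (Python) =====
-- def monthly_active_users(events: list[tuple[int, str]]) -> dict[str, int]:
--     monthly_users = {}
--
--     for user_id, date_str in events:
--         month = date_str[:7]  # YYYY-MM
--
--         if month not in monthly_users:
--             monthly_users[month] = set()
--
--         monthly_users[month].add(user_id)
--
--     # convert sets to counts
--     return {month: len(users) for month, users in monthly_users.items()}
-- ===== SOURCE B (Python) =====
-- def monthly_active_users(events: list[tuple[int, str]]) -> dict[str, int]:
--     # one flat ordered-dedup of (month, user) pairs, then count months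
--     seen = list(dict.fromkeys((date_str[:7], user_id) for user_id, date_str in events))
--     counts = {}
--     for month, _user in seen:
--         counts[month] = counts.get(month, 0) + 1
--     return counts
-- ===== Notes on version B (the rewrite author's own statement) =====
-- stated objective: alternative
-- what changed: A builds a dict mapping each month to a set of user ids and then converts sets to counts; B instead ordered-dedups the flat list of (month, user) pairs in one pass and then counts months over the deduped pairs, maintaining one flat pair set and a counts dict instead of a dict of nested sets.
import Mathlib
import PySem

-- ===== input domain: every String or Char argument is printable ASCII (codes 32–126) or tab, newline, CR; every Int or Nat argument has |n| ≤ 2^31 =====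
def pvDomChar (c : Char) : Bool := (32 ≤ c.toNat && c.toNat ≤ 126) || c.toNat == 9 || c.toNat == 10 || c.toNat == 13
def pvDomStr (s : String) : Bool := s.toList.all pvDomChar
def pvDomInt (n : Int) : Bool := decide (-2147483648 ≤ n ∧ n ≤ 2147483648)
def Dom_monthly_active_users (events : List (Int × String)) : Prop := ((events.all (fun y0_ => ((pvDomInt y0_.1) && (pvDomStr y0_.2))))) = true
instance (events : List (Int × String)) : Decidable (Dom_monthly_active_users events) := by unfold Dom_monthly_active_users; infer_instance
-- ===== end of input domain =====

-- B replaces A's dict-of-per-month-sets with one flat ordered-dedup of (month, user) pairs followed by a month-counting pass (alternative decomposition, similar cost).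


-- ===== PORT A =====
-- one loop iteration of A: ensure the month key exists, then add the user id to its set
def pvStepA (mu : PySem.Dict String (PySem.Set Int)) (e : Int × String) : PySem.Dict String (PySem.Set Int) :=
  let month := PySem.Str.slice e.2 none (some 7)
  let mu1 := if mu.contains month then mu else mu.insert month PySem.Set.empty
  mu1.modify month PySem.Set.empty (fun s => PySem.Set.add s e.1)

def monthly_active_users (events : List (Int × String)) : List (String × Int) :=
  let mu := events.foldl pvStepA PySem.Dict.empty
  mu.items.map (fun p => (p.1, PySem.Set.len p.2))

-- ===== PORT B =====
def monthly_active_users_alt (events : List (Int × String)) : List (String × Int) :=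
  let seen := PySem.List.dedup (events.map (fun e => (PySem.Str.slice e.2 none (some 7), e.1)))
  (seen.foldl (fun counts p => counts.insert p.1 (counts.getD p.1 0 + 1)) PySem.Dict.empty).items

-- ===== PRECONDITION & SPEC =====
def Spec_monthly_active_users (events : List (Int × String)) (out : List (String × Int)) : Prop := out = monthly_active_users_alt events
instance (events : List (Int × String)) (out : List (String × Int)) : Decidable (Spec_monthly_active_users events out) := by unfold Spec_monthly_active_users; infer_instance

-- ===== CLAIM (what is proved, stated in full; the proofs are below) =====
def Claim_equal_monthly_active_users : Prop := ∀ (events : List (Int × String)), Dom_monthly_active_users events → Spec_monthly_active_users events (monthly_active_users events)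

-- ===== LEMMAS AND PROOFS =====

-- the (month, user) pair list both programs are conceptually about
def pvPairs (events : List (Int × String)) : List (String × Int) :=
  events.map (fun e => (PySem.Str.slice e.2 none (some 7), e.1))

lemma pvStepA_getD (d : PySem.Dict String (PySem.Set Int)) (e : Int × String) (m : String) :
    (pvStepA d e).getD m PySem.Set.empty
      = if m = PySem.Str.slice e.2 none (some 7)
        then PySem.Set.add (d.getD (PySem.Str.slice e.2 none (some 7)) PySem.Set.empty) e.1
        else d.getD m PySem.Set.empty := by
  unfold pvStepA
  have hmu1 : ∀ x, ((if d.contains (PySem.Str.slice e.2 none (some 7)) then d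
      else d.insert (PySem.Str.slice e.2 none (some 7)) PySem.Set.empty)).getD x PySem.Set.empty
      = d.getD x PySem.Set.empty := by
    intro x
    by_cases hc : d.contains (PySem.Str.slice e.2 none (some 7))
    · rw [if_pos hc]
    · rw [if_neg hc, PySem.Dict.getD_insert]
      split_ifs with hx
      · subst hx; rw [PySem.Dict.getD_of_not_contains _ _ (by simpa using hc)]
      · rfl
  rw [PySem.Dict.getD_modify, hmu1, hmu1]

lemma pvA_getD (es : List (Int × String)) (m : String) :
    (es.foldl pvStepA PySem.Dict.empty).getD m PySem.Set.empty
      = PySem.Set.ofList (((pvPairs es).filter (fun p => p.1 == m)).map Prod.snd) := by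
  induction es using List.reverseRecOn with
  | nil => simp [pvPairs, PySem.Set.ofList]
  | append_singleton es e ih =>
    rw [List.foldl_append]
    simp only [List.foldl_cons, List.foldl_nil]
    rw [pvStepA_getD]
    simp only [pvPairs, List.map_append, List.map_cons, List.map_nil, List.filter_append]
    by_cases hm : m = PySem.Str.slice e.2 none (some 7)
    · subst hm
      rw [if_pos rfl, ih]
      simp [pvPairs, PySem.Set.ofList_append_singleton]
    · rw [if_neg hm, ih]
      have h2 : ¬ ((PySem.Str.slice e.2 none (some 7) : String) == m) = true := by
        simp; exact fun h => hm h.symm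
      simp [pvPairs, h2]

lemma pvStepA_keys (d : PySem.Dict String (PySem.Set Int)) (e : Int × String) :
    (pvStepA d e).keys = PySem.Set.add d.keys (PySem.Str.slice e.2 none (some 7)) := by
  unfold pvStepA
  rw [PySem.Dict.keys_modify]
  by_cases hc : d.contains (PySem.Str.slice e.2 none (some 7))
  · rw [if_pos hc, PySem.Dict.keys_insert_of_contains _ _ hc,
      PySem.Set.add_of_mem ((PySem.Dict.contains_iff_mem_keys _ _).mp hc)]
  · have hc' : d.contains (PySem.Str.slice e.2 none (some 7)) = false := by simpa using hc
    have hnm : PySem.Str.slice e.2 none (some 7) ∉ d.keys := by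
      intro h; exact hc ((PySem.Dict.contains_iff_mem_keys _ _).mpr h)
    rw [if_neg hc, PySem.Dict.keys_insert_of_contains _ _ (PySem.Dict.contains_insert_self _ _ _),
      PySem.Dict.keys_insert_of_not_contains _ _ hc', PySem.Set.add_of_not_mem hnm]

lemma pvA_keys (es : List (Int × String)) :
    (es.foldl pvStepA PySem.Dict.empty).keys = PySem.Set.ofList ((pvPairs es).map Prod.fst) := by
  induction es using List.reverseRecOn with
  | nil => simp [pvPairs, PySem.Set.ofList]
  | append_singleton es e ih =>
    rw [List.foldl_append]
    simp only [List.foldl_cons, List.foldl_nil]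
    rw [pvStepA_keys, ih]
    simp only [pvPairs, List.map_append, List.map_cons, List.map_nil]
    rw [PySem.Set.ofList_append_singleton]

lemma pvDedup_fst (ps : List (String × Int)) :
    PySem.Set.ofList ((PySem.Set.ofList ps).map Prod.fst) = PySem.Set.ofList (ps.map Prod.fst) := by
  induction ps using List.reverseRecOn with
  | nil => rfl
  | append_singleton ps p ih =>
    rw [PySem.Set.ofList_append_singleton, List.map_append, PySem.Set.add_eq_ite (PySem.Set.ofList ps) p]
    simp only [List.map_cons, List.map_nil]
    rw [PySem.Set.ofList_append_singleton]
    by_cases hp : p ∈ PySem.Set.ofList ps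
    · rw [if_pos hp, ih, PySem.Set.add_of_mem]
      rw [PySem.Set.mem_ofList]
      exact List.mem_map_of_mem ((PySem.Set.mem_ofList _ _).mp hp)
    · rw [if_neg hp, List.map_append]
      simp only [List.map_cons, List.map_nil]
      rw [PySem.Set.ofList_append_singleton, ih]

lemma pvCount_eq_len (ps : List (String × Int)) (m : String) :
    (((PySem.Set.ofList ps).map Prod.fst).count m : Int)
      = PySem.Set.len (PySem.Set.ofList ((ps.filter (fun p => p.1 == m)).map Prod.snd)) := by
  induction ps using List.reverseRecOn with
  | nil => rfl
  | append_singleton ps p ih =>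
    rw [PySem.Set.ofList_append_singleton, List.filter_append,
      PySem.Set.add_eq_ite (PySem.Set.ofList ps) p]
    by_cases hm : p.1 = m
    · have hf : [p].filter (fun p => p.1 == m) = [p] := by simp [hm]
      rw [hf]
      by_cases hp : p ∈ PySem.Set.ofList ps
      · rw [if_pos hp, List.map_append]
        simp only [List.map_cons, List.map_nil]
        rw [PySem.Set.ofList_append_singleton, PySem.Set.add_of_mem, ih]
        rw [PySem.Set.mem_ofList]
        refine List.mem_map_of_mem (List.mem_filter.mpr ⟨(PySem.Set.mem_ofList _ _).mp hp, by simp [hm]⟩)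
      · rw [if_neg hp, List.map_append, List.count_append, List.map_append]
        simp only [List.map_cons, List.map_nil]
        rw [PySem.Set.ofList_append_singleton, PySem.Set.add_of_not_mem]
        · have hc1 : List.count m [p.1] = 1 := by simp [hm]
          rw [hc1]
          simp only [PySem.Set.len, List.length_append, List.length_cons, List.length_nil] at ih ⊢
          push_cast at ih ⊢
          omega
        · intro hmem
          rw [PySem.Set.mem_ofList] at hmem
          obtain ⟨q, hq, hq2⟩ := List.mem_map.mp hmem
          obtain ⟨hq1, hq3⟩ := List.mem_filter.mp hq
          apply hp
          rw [PySem.Set.mem_ofList]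
          have hqp : q = p := by
            have h1 : q.1 = m := by simpa using hq3
            cases p; cases q; simp_all
          rwa [← hqp]
    · have hf : [p].filter (fun p => p.1 == m) = [] := by simp [hm]
      rw [hf, List.append_nil]
      by_cases hp : p ∈ PySem.Set.ofList ps
      · rw [if_pos hp, ih]
      · rw [if_neg hp, List.map_append, List.count_append]
        simp only [List.map_cons, List.map_nil]
        have h0 : List.count m [p.1] = 0 := by simp [hm]
        rw [h0]
        simpa using ih
lemma pvFoldCounter (l : List (String × Int)) :
    l.foldl (fun counts p => counts.insert p.1 (counts.getD p.1 0 + 1)) PySem.Dict.empty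
      = PySem.Dict.counter (l.map Prod.fst) := by
  rw [← PySem.Dict.foldl_insert_getD_add_one_eq_counter, List.foldl_map]

theorem pv_main : ∀ events, Spec_monthly_active_users events (monthly_active_users events) := by
  intro events
  unfold Spec_monthly_active_users monthly_active_users monthly_active_users_alt
  simp only [PySem.List.dedup_eq_ofList, pvFoldCounter, PySem.Dict.items_counter]
  rw [show (events.map (fun e => (PySem.Str.slice e.2 none (some 7), e.1))) = pvPairs events from rfl]
  rw [pvDedup_fst]
  have hnd : (events.foldl pvStepA PySem.Dict.empty).keys.Nodup := by
    rw [pvA_keys]; exact PySem.Set.nodup_ofList _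
  rw [PySem.Dict.items_eq_map_keys _ hnd PySem.Set.empty, pvA_keys, List.map_map]
  apply List.map_congr_left
  intro k hk
  simp only [Function.comp]
  rw [pvA_getD, ← pvCount_eq_len]

-- ===== VERDICT (by name: the statement is the Claim_ definition above) =====
theorem monthly_active_users_spec : Claim_equal_monthly_active_users := by
  intro events _
  exact pv_main events
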